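-- pv_equiv track=rewrite | github.com/pypi-data/pypi-mirror-376 | packages/cyclic-crop-rotation/cyclic_crop_rotation-2025.0.1.tar.gz/cyclic_crop_rotation-2025.0.1/src/cyclic_crop_rotation/rotation.py | _idxs_selector
-- ===== SOURCE A (Python) =====
-- def _idxs_selector(idxs,blocks,start_pos=False):
--     '''
--     Args:
--         idxs (list): list of indexes which to look at in the dataframe
--         blocks (list): list of blocks to consider
--         start_pos (int): if the start position is used as the first tiebraker and then the smallest window size.
--     Returns:
--         int: the index value of the row of the data frame which is:
--             1. is in idxs
--             2. and has the smallest window size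
--             3. breaks ties using starting position.
--     '''
--     if start_pos:
--         min_sp = min(blocks[i][0] for i in idxs)
--         idxs = [i for i in idxs if blocks[i][0]==min_sp]
--         if len(idxs)==1:
--             return idxs[0]
--     min_rot_size = min(blocks[i][2] for i in idxs)
--     idxs = [i for i in idxs if blocks[i][2]==min_rot_size]
--     if len(idxs)==1:
--         return idxs[0]
--     # if that isn't sufficient, get the one with smallest start position
--     min_sp = min(blocks[i][0] for i in idxs)
--     idxs = [i for i in idxs if blocks[i][0]==min_sp]
--     if len(idxs)==1:
--         return idxs[0]
--     # This shouldn't ever happen if the blocks are generated through valid blocks.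
--     raise NameError('Set Cover Indeterminant. Need Additional Condition')
-- ===== SOURCE B (Python) =====
-- def _idxs_selector(idxs, blocks, start_pos=False):
--     '''Single keyed min pass plus a uniqueness count, instead of chained
--     min/filter scans.'''
--     if start_pos:
--         key = lambda i: (blocks[i][0], blocks[i][2])
--     else:
--         key = lambda i: (blocks[i][2], blocks[i][0])
--     best = min(idxs, key=key)
--     if sum(1 for i in idxs if key(i) == key(best)) == 1:
--         return best
--     raise NameError('Set Cover Indeterminant. Need Additional Condition')
-- ===== Notes on version B (the rewrite author's own statement) =====
-- stated objective: simpler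
-- what changed: A's three/four chained min-scan-then-filter passes over idxs are replaced by a single keyed min (lexicographic tuple key depending on start_pos) plus one uniqueness count.
import Mathlib
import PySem

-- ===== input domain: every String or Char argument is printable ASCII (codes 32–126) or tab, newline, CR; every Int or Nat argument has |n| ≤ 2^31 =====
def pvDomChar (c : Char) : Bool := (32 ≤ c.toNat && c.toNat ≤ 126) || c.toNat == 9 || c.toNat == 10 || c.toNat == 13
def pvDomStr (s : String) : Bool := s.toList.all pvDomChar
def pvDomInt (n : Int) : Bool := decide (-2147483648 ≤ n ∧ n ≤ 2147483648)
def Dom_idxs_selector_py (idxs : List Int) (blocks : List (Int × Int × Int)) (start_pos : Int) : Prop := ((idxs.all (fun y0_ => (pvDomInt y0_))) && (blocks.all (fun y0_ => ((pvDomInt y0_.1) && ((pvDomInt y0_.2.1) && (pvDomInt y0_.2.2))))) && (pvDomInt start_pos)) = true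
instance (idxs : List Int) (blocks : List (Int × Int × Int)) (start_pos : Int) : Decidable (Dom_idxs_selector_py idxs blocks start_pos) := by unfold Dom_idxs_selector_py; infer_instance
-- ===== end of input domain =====

-- B replaces A's chained min/filter scans by one keyed-min pass plus a uniqueness count (objective: simpler).
-- Both programs raise (ValueError / IndexError / NameError) on the same inputs; Pre_ excludes exactly those.

-- blocks[i] (Python indexing, negative i from the end); Pre_ guarantees the index is in range,
-- so the default is never returned on admitted inputs.
def pvBlk (blocks : List (Int × Int × Int)) (i : Int) : Int × Int × Int :=
  (PySem.List.pyGet? blocks i).getD (0, 0, 0)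

-- ===== PORT A =====
-- the part of A after the optional start_pos pre-filter: filter by min window size, then by min start
def pvRestA (idxs : List Int) (blocks : List (Int × Int × Int)) : Int :=
  let min_rot_size := (PySem.List.min? (idxs.map (fun i => (pvBlk blocks i).2.2)) (fun x => x)).getD 0
  let idxs1 := idxs.filter (fun i => (pvBlk blocks i).2.2 == min_rot_size)
  if idxs1.length == 1 then idxs1.headD 0
  else
    let min_sp := (PySem.List.min? (idxs1.map (fun i => (pvBlk blocks i).1)) (fun x => x)).getD 0
    let idxs2 := idxs1.filter (fun i => (pvBlk blocks i).1 == min_sp)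
    if idxs2.length == 1 then idxs2.headD 0
    else 0  -- Python: raise NameError; excluded by Pre_

def idxs_selector_py (idxs : List Int) (blocks : List (Int × Int × Int)) (start_pos : Int) : Int :=
  if start_pos ≠ 0 then
    let min_sp := (PySem.List.min? (idxs.map (fun i => (pvBlk blocks i).1)) (fun x => x)).getD 0
    let idxs1 := idxs.filter (fun i => (pvBlk blocks i).1 == min_sp)
    if idxs1.length == 1 then idxs1.headD 0
    else pvRestA idxs1 blocks
  else pvRestA idxs blocks

-- ===== PORT B =====
-- B's composite key: (start, window) when start_pos is truthy, else (window, start)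
def pvKey (blocks : List (Int × Int × Int)) (start_pos : Int) (i : Int) : Int × Int :=
  let b := pvBlk blocks i
  if start_pos ≠ 0 then (b.1, b.2.2) else (b.2.2, b.1)

-- Python's lexicographic < on int pairs (as used by min with a tuple key)
def pvLexLt (a b : Int × Int) : Bool := a.1 < b.1 || (a.1 == b.1 && a.2 < b.2)

def idxs_selector_py_alt (idxs : List Int) (blocks : List (Int × Int × Int)) (start_pos : Int) : Int :=
  match idxs with
  | [] => 0  -- Python: min([]) raises ValueError; excluded by Pre_
  | x :: t =>
    let key := pvKey blocks start_pos
    let best := t.foldl (fun b i => if pvLexLt (key i) (key b) then i else b) x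
    if idxs.countP (fun i => key i == key best) == 1 then best
    else 0  -- Python: raise NameError; excluded by Pre_

-- ===== PRECONDITION & SPEC =====
def pvLexLe (a b : Int × Int) : Bool := a.1 < b.1 || (a.1 == b.1 && a.2 ≤ b.2)

-- i is an occurrence whose key is lexicographically minimal over l
def pvIsMin (key : Int → Int × Int) (l : List Int) (i : Int) : Bool :=
  l.all (fun j => pvLexLe (key i) (key j))

-- Pre_: exactly the inputs where A returns normally — idxs nonempty (else ValueError),
-- every index in Python range of blocks (else IndexError), and exactly one occurrence in idxs
-- attains the minimal composite key (else A raises NameError 'Set Cover Indeterminant').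
def Pre_idxs_selector_py (idxs : List Int) (blocks : List (Int × Int × Int)) (start_pos : Int) : Prop :=
  idxs ≠ [] ∧ (∀ i ∈ idxs, PySem.Raise.InRange blocks.length i) ∧
  idxs.countP (pvIsMin (pvKey blocks start_pos) idxs) = 1

instance (idxs : List Int) (blocks : List (Int × Int × Int)) (start_pos : Int) : Decidable (Pre_idxs_selector_py idxs blocks start_pos) := by unfold Pre_idxs_selector_py; infer_instance

def pvWitness_idxs_selector_py : List Int × (List (Int × Int × Int)) × Int := ([0, 1], [(0, 0, 1), (0, 0, 2)], 0)

def Spec_idxs_selector_py (idxs : List Int) (blocks : List (Int × Int × Int)) (start_pos : Int) (out : Int) : Prop := out = idxs_selector_py_alt idxs blocks start_pos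
instance (idxs : List Int) (blocks : List (Int × Int × Int)) (start_pos : Int) (out : Int) : Decidable (Spec_idxs_selector_py idxs blocks start_pos out) := by unfold Spec_idxs_selector_py; infer_instance

-- ===== CLAIM (what is proved, stated in full; the proofs are below) =====
def Claim_equal_idxs_selector_py : Prop := ∀ (idxs : List Int) (blocks : List (Int × Int × Int)) (start_pos : Int), Dom_idxs_selector_py idxs blocks start_pos → Pre_idxs_selector_py idxs blocks start_pos → Spec_idxs_selector_py idxs blocks start_pos (idxs_selector_py idxs blocks start_pos)

-- ===== LEMMAS AND PROOFS =====

theorem pvLexLe_refl (a : Int × Int) : pvLexLe a a = true := by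
  simp [pvLexLe]

theorem pvLexLe_trans {a b c : Int × Int} (h1 : pvLexLe a b = true) (h2 : pvLexLe b c = true) :
    pvLexLe a c = true := by
  obtain ⟨a1, a2⟩ := a; obtain ⟨b1, b2⟩ := b; obtain ⟨c1, c2⟩ := c
  simp [pvLexLe] at *; omega

theorem pvLexLe_antisymm {a b : Int × Int} (h1 : pvLexLe a b = true) (h2 : pvLexLe b a = true) :
    a = b := by
  obtain ⟨a1, a2⟩ := a; obtain ⟨b1, b2⟩ := b
  simp [pvLexLe] at *; omega

theorem pvLexLe_of_not_lt {a b : Int × Int} (h : pvLexLt a b = false) : pvLexLe b a = true := by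
  obtain ⟨a1, a2⟩ := a; obtain ⟨b1, b2⟩ := b
  simp [pvLexLe, pvLexLt] at *; omega

theorem pvLexLe_of_lt {a b : Int × Int} (h : pvLexLt a b = true) : pvLexLe a b = true := by
  obtain ⟨a1, a2⟩ := a; obtain ⟨b1, b2⟩ := b
  simp [pvLexLe, pvLexLt] at *; omega

-- the fold in port B returns an element of the list whose key is minimal
theorem fold_min_spec (key : Int → Int × Int) (t : List Int) (x : Int) :
    (t.foldl (fun b i => if pvLexLt (key i) (key b) then i else b) x) ∈ x :: t ∧
      ∀ j ∈ x :: t, pvLexLe (key (t.foldl (fun b i => if pvLexLt (key i) (key b) then i else b) x)) (key j) = true := by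
  induction t generalizing x with
  | nil => simp [pvLexLe_refl]
  | cons i t ih =>
    have step : (i :: t).foldl (fun b i => if pvLexLt (key i) (key b) then i else b) x
        = t.foldl (fun b i => if pvLexLt (key i) (key b) then i else b)
            (if pvLexLt (key i) (key x) then i else x) := rfl
    rw [step]
    obtain ⟨hmem, hmin⟩ := ih (if pvLexLt (key i) (key x) then i else x)
    set x' := if pvLexLt (key i) (key x) then i else x with hx'
    have hx'cases : x' = i ∨ x' = x := by
      by_cases h : pvLexLt (key i) (key x) = true
      · left; simp [hx', h]
      · right; simp [hx', h]
    have hle_x : pvLexLe (key x') (key x) = true := by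
      by_cases h : pvLexLt (key i) (key x) = true
      · simp only [hx', if_pos h]; exact pvLexLe_of_lt h
      · simp only [hx', if_neg h]; exact pvLexLe_refl _
    have hle_i : pvLexLe (key x') (key i) = true := by
      by_cases h : pvLexLt (key i) (key x) = true
      · simp only [hx', if_pos h]; exact pvLexLe_refl _
      · simp only [hx', if_neg h]
        exact pvLexLe_of_not_lt (by simpa using h)
    constructor
    · have hx'mem : x' ∈ x :: i :: t := by rcases hx'cases with h' | h' <;> simp [h']
      rcases List.mem_cons.mp hmem with h | h
      · rw [h]; exact hx'mem
      · simp [h]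
    · intro j hj
      have hbx' : pvLexLe (key (t.foldl (fun b i => if pvLexLt (key i) (key b) then i else b) x')) (key x') = true :=
        hmin x' (by simp)
      rcases List.mem_cons.mp hj with h | hj2
      · subst h; exact pvLexLe_trans hbx' hle_x
      rcases List.mem_cons.mp hj2 with h | h
      · subst h; exact pvLexLe_trans hbx' hle_i
      · exact hmin j (by simp [h])

-- minimizers have the minimal first component
theorem isMin_fst_eq {f g : Int → Int} {l : List Int} {m : Int}
    (hm : PySem.List.min? (l.map f) (fun x => x) = some m)
    {i : Int} (hi : i ∈ l) (hmin : pvIsMin (fun i => (f i, g i)) l i = true) : f i = m := by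
  obtain ⟨i0, hi0, hfi0⟩ := List.mem_map.mp (PySem.List.min?_mem hm)
  have h1 : m ≤ f i := PySem.List.min?_isMin hm (f i) (List.mem_map.mpr ⟨i, hi, rfl⟩)
  have h2 : pvLexLe (f i, g i) (f i0, g i0) = true := by
    simp [pvIsMin, List.all_eq_true] at hmin; exact hmin i0 hi0
  simp [pvLexLe] at h2; omega

theorem restA_eq {blocks : List (Int × Int × Int)} {l : List Int} (hne : l ≠ [])
    (hc : l.countP (pvIsMin (fun i => ((pvBlk blocks i).2.2, (pvBlk blocks i).1)) l) = 1)
    {b : Int} (hb : b ∈ l)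
    (hbmin : pvIsMin (fun i => ((pvBlk blocks i).2.2, (pvBlk blocks i).1)) l b = true) :
    pvRestA l blocks = b := by
  have hK : ∀ i ∈ l, pvIsMin (fun i => ((pvBlk blocks i).2.2, (pvBlk blocks i).1)) l i = true →
      ∀ j ∈ l, pvLexLe ((pvBlk blocks i).2.2, (pvBlk blocks i).1) ((pvBlk blocks j).2.2, (pvBlk blocks j).1) = true := by
    intro i _ hmin j hj
    simp only [pvIsMin, List.all_eq_true] at hmin
    exact hmin j hj
  unfold pvRestA
  cases hm : PySem.List.min? (l.map fun i => (pvBlk blocks i).2.2) (fun x => x) with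
  | none =>
    rw [PySem.List.min?_eq_none_iff, List.map_eq_nil_iff] at hm
    exact absurd hm hne
  | some m =>
  simp only [Option.getD_some]
  have hfb : (pvBlk blocks b).2.2 = m := isMin_fst_eq hm hb hbmin
  have hbl1 : b ∈ l.filter (fun i => (pvBlk blocks i).2.2 == m) :=
    List.mem_filter.mpr ⟨hb, by simp [hfb]⟩
  set l1 := l.filter (fun i => (pvBlk blocks i).2.2 == m) with hl1
  by_cases h1 : l1.length = 1
  · obtain ⟨c, hcEq⟩ := List.length_eq_one_iff.mp h1
    have hbc : b = c := by rw [hcEq] at hbl1; simpa using hbl1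
    simp [hcEq, hbc]
  · rw [if_neg (by simpa using h1)]
    cases hm2 : PySem.List.min? (l1.map fun i => (pvBlk blocks i).1) (fun x => x) with
    | none =>
      rw [PySem.List.min?_eq_none_iff, List.map_eq_nil_iff] at hm2
      rw [hm2] at hbl1; simp at hbl1
    | some m2 =>
    simp only [Option.getD_some]
    -- the two filters compose to exactly the minimizer predicate
    have hequiv : ∀ i ∈ l,
        (((pvBlk blocks i).1 == m2) && ((pvBlk blocks i).2.2 == m)) = pvIsMin (fun i => ((pvBlk blocks i).2.2, (pvBlk blocks i).1)) l i := by
      intro i hi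
      rw [Bool.eq_iff_iff]
      constructor
      · intro h
        simp only [Bool.and_eq_true, beq_iff_eq] at h
        obtain ⟨hgi, hfi⟩ := h
        simp only [pvIsMin, List.all_eq_true]
        intro j hj
        have hmle : m ≤ (pvBlk blocks j).2.2 :=
          PySem.List.min?_isMin hm _ (List.mem_map.mpr ⟨j, hj, rfl⟩)
        by_cases hfj : (pvBlk blocks j).2.2 = m
        · have hjl1 : j ∈ l1 := List.mem_filter.mpr ⟨hj, by simp [hfj]⟩
          have hm2le : m2 ≤ (pvBlk blocks j).1 :=
            PySem.List.min?_isMin hm2 _ (List.mem_map.mpr ⟨j, hjl1, rfl⟩)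
          simp [pvLexLe]; omega
        · simp [pvLexLe]; omega
      · intro h
        have hfi : (pvBlk blocks i).2.2 = m := isMin_fst_eq hm hi h
        have hil1 : i ∈ l1 := List.mem_filter.mpr ⟨hi, by simp [hfi]⟩
        have hm2le : m2 ≤ (pvBlk blocks i).1 :=
          PySem.List.min?_isMin hm2 _ (List.mem_map.mpr ⟨i, hil1, rfl⟩)
        obtain ⟨j0, hj0l1, hgj0⟩ := List.mem_map.mp (PySem.List.min?_mem hm2)
        have hj0l : j0 ∈ l := (List.mem_filter.mp hj0l1).1
        have hfj0 : (pvBlk blocks j0).2.2 = m := by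
          have := (List.mem_filter.mp hj0l1).2; simpa using this
        have hle := hK i hi h j0 hj0l
        simp only [pvLexLe, Bool.or_eq_true, Bool.and_eq_true, decide_eq_true_eq, beq_iff_eq] at hle
        simp only [Bool.and_eq_true, beq_iff_eq]
        omega
    have hl2 : l1.filter (fun i => (pvBlk blocks i).1 == m2)
        = l.filter (pvIsMin (fun i => ((pvBlk blocks i).2.2, (pvBlk blocks i).1)) l) := by
      rw [hl1, List.filter_filter]
      exact List.filter_congr hequiv
    have hlen2 : (l1.filter (fun i => (pvBlk blocks i).1 == m2)).length = 1 := by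
      rw [hl2, ← List.countP_eq_length_filter]; exact hc
    obtain ⟨c, hcEq⟩ := List.length_eq_one_iff.mp hlen2
    have hbl2 : b ∈ l1.filter (fun i => (pvBlk blocks i).1 == m2) := by
      rw [hl2]; exact List.mem_filter.mpr ⟨hb, hbmin⟩
    have hbc : b = c := by rw [hcEq] at hbl2; simpa using hbl2
    simp [hcEq, hbc]

-- ===== VERDICT (by name: the statement is the Claim_ definition above) =====
theorem idxs_selector_py_spec : Claim_equal_idxs_selector_py := by
  intro idxs blocks sp _ hpre
  obtain ⟨hne, _, hc⟩ := hpre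
  unfold Spec_idxs_selector_py
  cases idxs with
  | nil => exact absurd rfl hne
  | cons x t =>
  obtain ⟨hbmem, hbmin⟩ := fold_min_spec (pvKey blocks sp) t x
  set best := t.foldl (fun b i => if pvLexLt (pvKey blocks sp i) (pvKey blocks sp b) then i else b) x with hbest
  have hbminP : pvIsMin (pvKey blocks sp) (x :: t) best = true := by
    simp only [pvIsMin, List.all_eq_true]; exact hbmin
  have hcount2 : (x :: t).countP (fun i => pvKey blocks sp i == pvKey blocks sp best) = 1 := by
    refine (List.countP_congr ?_).trans hc
    intro i hi
    simp only [beq_iff_eq]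
    constructor
    · intro h
      simp only [pvIsMin, List.all_eq_true]
      intro j hj
      rw [h]; exact hbmin j hj
    · intro h
      have h1 : pvLexLe (pvKey blocks sp i) (pvKey blocks sp best) = true := by
        simp only [pvIsMin, List.all_eq_true] at h; exact h best hbmem
      exact pvLexLe_antisymm h1 (hbmin i hi)
  have hB : idxs_selector_py_alt (x :: t) blocks sp = best := by
    simp only [idxs_selector_py_alt]
    rw [← hbest]
    simp [hcount2]
  rw [hB]
  by_cases hsp : sp ≠ 0
  · -- start_pos truthy: A first filters on start position, then window size
    have hKfun : pvKey blocks sp = fun i => ((pvBlk blocks i).1, (pvBlk blocks i).2.2) := by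
      funext i; simp [pvKey, hsp]
    rw [hKfun] at hc hbminP
    unfold idxs_selector_py
    rw [if_pos hsp]
    cases hm : PySem.List.min? ((x :: t).map fun i => (pvBlk blocks i).1) (fun x => x) with
    | none => rw [PySem.List.min?_eq_none_iff] at hm; simp at hm
    | some m =>
    simp only [Option.getD_some]
    have hfb : (pvBlk blocks best).1 = m := isMin_fst_eq hm hbmem hbminP
    have hbl1 : best ∈ (x :: t).filter (fun i => (pvBlk blocks i).1 == m) :=
      List.mem_filter.mpr ⟨hbmem, by simp [hfb]⟩
    set l1 := (x :: t).filter (fun i => (pvBlk blocks i).1 == m) with hl1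
    by_cases h1 : l1.length = 1
    · obtain ⟨c, hcEq⟩ := List.length_eq_one_iff.mp h1
      have hbc : best = c := by rw [hcEq] at hbl1; simpa using hbl1
      simp [hcEq, hbc]
    · rw [if_neg (by simpa using h1)]
      -- on l1 all start positions equal m, so the (window, start) order over l1
      -- coincides with the global (start, window) order
      have hequiv : ∀ i ∈ l1,
          pvIsMin (fun i => ((pvBlk blocks i).2.2, (pvBlk blocks i).1)) l1 i
            = pvIsMin (fun i => ((pvBlk blocks i).1, (pvBlk blocks i).2.2)) (x :: t) i := by
        intro i hil1
        obtain ⟨hil, hfi⟩ := List.mem_filter.mp hil1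
        simp only [beq_iff_eq] at hfi
        rw [Bool.eq_iff_iff]
        simp only [pvIsMin, List.all_eq_true]
        constructor
        · intro h j hj
          have hmle : m ≤ (pvBlk blocks j).1 :=
            PySem.List.min?_isMin hm _ (List.mem_map.mpr ⟨j, hj, rfl⟩)
          by_cases hfj : (pvBlk blocks j).1 = m
          · have hjl1 : j ∈ l1 := List.mem_filter.mpr ⟨hj, by simp [hfj]⟩
            have := h j hjl1
            simp only [pvLexLe, Bool.or_eq_true, Bool.and_eq_true, decide_eq_true_eq, beq_iff_eq] at this ⊢
            omega
          · simp only [pvLexLe, Bool.or_eq_true, Bool.and_eq_true, decide_eq_true_eq, beq_iff_eq]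
            omega
        · intro h j hjl1
          obtain ⟨hjl, hfj⟩ := List.mem_filter.mp hjl1
          simp only [beq_iff_eq] at hfj
          have := h j hjl
          simp only [pvLexLe, Bool.or_eq_true, Bool.and_eq_true, decide_eq_true_eq, beq_iff_eq] at this ⊢
          omega
      have hcl1 : l1.countP (pvIsMin (fun i => ((pvBlk blocks i).2.2, (pvBlk blocks i).1)) l1) = 1 := by
        rw [List.countP_congr (fun i hi => Bool.eq_iff_iff.mp (hequiv i hi))]
        rw [hl1, List.countP_filter]
        refine (List.countP_congr ?_).trans hc
        intro i hi
        simp only [Bool.and_eq_true, beq_iff_eq]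
        constructor
        · intro h; exact h.1
        · intro h; exact ⟨h, isMin_fst_eq hm hi h⟩
      have hbminl1 : pvIsMin (fun i => ((pvBlk blocks i).2.2, (pvBlk blocks i).1)) l1 best = true := by
        rw [hequiv best hbl1]; exact hbminP
      exact restA_eq (List.ne_nil_of_mem hbl1) hcl1 hbl1 hbminl1
  · -- start_pos falsy: A is just the window-then-start chain on all of idxs
    have hKfun : pvKey blocks sp = fun i => ((pvBlk blocks i).2.2, (pvBlk blocks i).1) := by
      funext i; simp [pvKey, hsp]
    rw [hKfun] at hc hbminP
    unfold idxs_selector_py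
    rw [if_neg hsp]
    exact restA_eq hne hc hbmem hbminP
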